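-- pv_equiv track=rewrite | github.com/AdriaanMolendijk/project-euler | python/exercise032.py | are_permutations
-- ===== SOURCE A (Python) =====
-- def are_permutations(n1, n2):
--     digits1 = [0 for i in range(10)]
--     digits2 = [0 for i in range(10)]
--     for c in str(n1):
--         digits1[int(c)] = digits1[int(c)] + 1
--     for c in str(n2):
--         digits2[int(c)] = digits2[int(c)] + 1
--     for digit in range(10):
--         if digits1[digit] != digits2[digit]:
--             return False
--     return True
-- ===== SOURCE B (Python) =====
-- def are_permutations(n1, n2):
--     return sorted(int(c) for c in str(n1)) == sorted(int(c) for c in str(n2))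
-- ===== Notes on version B (the rewrite author's own statement) =====
-- stated objective: simpler
-- what changed: Replaces the two 10-slot frequency arrays and the per-slot comparison loop with a one-line sort-based multiset comparison of the digit lists.
import Mathlib
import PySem

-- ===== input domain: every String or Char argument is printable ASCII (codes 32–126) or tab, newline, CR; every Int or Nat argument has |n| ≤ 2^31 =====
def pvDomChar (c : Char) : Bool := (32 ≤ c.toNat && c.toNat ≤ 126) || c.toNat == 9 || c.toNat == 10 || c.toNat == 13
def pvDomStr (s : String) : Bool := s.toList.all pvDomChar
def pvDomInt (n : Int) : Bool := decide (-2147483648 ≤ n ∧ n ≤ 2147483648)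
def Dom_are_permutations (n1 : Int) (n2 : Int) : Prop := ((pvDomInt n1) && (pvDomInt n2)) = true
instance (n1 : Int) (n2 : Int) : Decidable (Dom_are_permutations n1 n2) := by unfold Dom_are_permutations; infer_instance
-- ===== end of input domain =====

-- B replaces A's two 10-slot frequency arrays and per-slot comparison loop with a
-- sort-based multiset comparison of the digit lists (objective: simpler).


-- ===== PORT A =====
-- digits[int(c)] = digits[int(c)] + 1 ; inside Pre_ every char of str(n) is a digit,
-- so int(c) is the char's value c.toNat - 48 (exact there; outside Pre_ Python raises ValueError).
def pvBump (d : List Int) (c : Char) : List Int :=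
  d.set (c.toNat - 48) (d.getD (c.toNat - 48) 0 + 1)

-- the final loop: for digit in range(10): if digits1[digit] != digits2[digit]: return False
def pvCheck (d1 d2 : List Int) : List Int → Bool
  | [] => true
  | i :: rest => if d1.getD i.toNat 0 ≠ d2.getD i.toNat 0 then false else pvCheck d1 d2 rest

def are_permutations (n1 : Int) (n2 : Int) : Bool :=
  let digits1 := (PySem.Int.toChars n1).foldl pvBump (List.replicate 10 (0 : Int))
  let digits2 := (PySem.Int.toChars n2).foldl pvBump (List.replicate 10 (0 : Int))
  pvCheck digits1 digits2 (PySem.List.pyRange 0 10 1)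

-- ===== PORT B =====
-- sorted(int(c) for c in str(n)) ; int(c) is the digit value inside Pre_ (see above).
def pvDigits (n : Int) : List Int :=
  (PySem.Int.toChars n).map (fun c => ((c.toNat : Int) - 48))

def are_permutations_alt (n1 : Int) (n2 : Int) : Bool :=
  PySem.List.sorted (pvDigits n1) (fun x => x) false
    == PySem.List.sorted (pvDigits n2) (fun x => x) false

-- ===== PRECONDITION & SPEC =====
-- Pre_ excludes negative arguments: str(n) then starts with '-' and int('-') raises
-- ValueError in A (and in B alike), so A returns no value there.
def Pre_are_permutations (n1 : Int) (n2 : Int) : Prop := 0 ≤ n1 ∧ 0 ≤ n2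
instance (n1 : Int) (n2 : Int) : Decidable (Pre_are_permutations n1 n2) := by
  unfold Pre_are_permutations; infer_instance

def pvWitness_are_permutations : Int × Int := (125874, 251748)

def Spec_are_permutations (n1 : Int) (n2 : Int) (out : Bool) : Prop := out = are_permutations_alt n1 n2
instance (n1 : Int) (n2 : Int) (out : Bool) : Decidable (Spec_are_permutations n1 n2 out) := by unfold Spec_are_permutations; infer_instance

-- ===== CLAIM (what is proved, stated in full; the proofs are below) =====
def Claim_equal_are_permutations : Prop := ∀ (n1 : Int) (n2 : Int), Dom_are_permutations n1 n2 → Pre_are_permutations n1 n2 → Spec_are_permutations n1 n2 (are_permutations n1 n2)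

-- ===== LEMMAS AND PROOFS =====

-- every char produced by Nat.toDigits 10 is an ASCII digit
theorem pv_toDigitsCore_digits (fuel : Nat) : ∀ (n : Nat) (l : List Char),
    (∀ c ∈ l, 48 ≤ c.toNat ∧ c.toNat ≤ 57) →
    ∀ c ∈ Nat.toDigitsCore 10 fuel n l, 48 ≤ c.toNat ∧ c.toNat ≤ 57 := by
  induction fuel with
  | zero => intro n l hl; simpa [Nat.toDigitsCore] using hl
  | succ f ih =>
    intro n l hl c hc
    have hd : 48 ≤ (Nat.digitChar (n % 10)).toNat ∧ (Nat.digitChar (n % 10)).toNat ≤ 57 := by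
      have : n % 10 < 10 := Nat.mod_lt _ (by omega)
      interval_cases h : n % 10 <;> simp [Nat.digitChar]
    simp only [Nat.toDigitsCore] at hc
    split at hc
    · rcases List.mem_cons.mp hc with h | h
      · exact h ▸ hd
      · exact hl _ h
    · exact ih _ _ (by
        intro c' hc'
        rcases List.mem_cons.mp hc' with h | h
        · exact h ▸ hd
        · exact hl _ h) c hc

theorem pv_toChars_digits (n : Int) (hn : 0 ≤ n) :
    ∀ c ∈ PySem.Int.toChars n, 48 ≤ c.toNat ∧ c.toNat ≤ 57 := by
  have : ¬ n < 0 := by omega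
  simpa [PySem.Int.toChars, this, Nat.toDigits] using
    pv_toDigitsCore_digits (n.toNat + 1) n.toNat [] (by simp)

-- the digit values of a nonnegative number lie in [0, 10)
theorem pvDigits_mem (n : Int) (hn : 0 ≤ n) :
    ∀ v ∈ pvDigits n, 0 ≤ v ∧ v < 10 := by
  intro v hv
  simp only [pvDigits, List.mem_map] at hv
  obtain ⟨c, hc, rfl⟩ := hv
  have := pv_toChars_digits n hn c hc
  omega

-- the counting fold computes digit counts
theorem pv_fold_count (s : List Char) : ∀ (d : List Int), d.length = 10 →
    (∀ c ∈ s, 48 ≤ c.toNat ∧ c.toNat ≤ 57) →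
    ∀ i : Nat, i < 10 →
    (s.foldl pvBump d).getD i 0
      = d.getD i 0 + ((s.map (fun c => ((c.toNat : Int) - 48))).count (i : Int) : Int) := by
  induction s with
  | nil => intro d _ _ i _; simp
  | cons c s ih =>
    intro d hd hdig i hi
    have hc := hdig c (List.mem_cons_self ..)
    have hlen : (pvBump d c).length = 10 := by simp [pvBump, hd]
    have hrec := ih (pvBump d c) hlen (fun c' hc' => hdig c' (List.mem_cons_of_mem _ hc')) i hi
    have hidx : c.toNat - 48 < 10 := by omega
    have hbump : (pvBump d c).getD i 0
        = d.getD i 0 + (if ((c.toNat : Int) - 48) = (i : Int) then 1 else 0) := by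
      by_cases h : c.toNat - 48 = i
      · subst h
        have : ((c.toNat : Int) - 48) = ((c.toNat - 48 : Nat) : Int) := by omega
        simp [pvBump, List.getD, hd, hidx, this]
      · have h' : ¬ ((c.toNat : Int) - 48) = (i : Int) := by omega
        simp [pvBump, List.getD, h, h']
    simp only [List.foldl_cons, hrec, hbump, List.map_cons, List.count_cons]
    by_cases h : ((c.toNat : Int) - 48) = (i : Int) <;> simp [h] <;> omega

-- pvCheck over the range list is the conjunction of the ten count equalities
theorem pv_check_iff (d1 d2 : List Int) : ∀ (l : List Int),
    pvCheck d1 d2 l = true ↔ ∀ i ∈ l, d1.getD i.toNat 0 = d2.getD i.toNat 0 := by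
  intro l
  induction l with
  | nil => simp [pvCheck]
  | cons i rest ih =>
    simp only [pvCheck]
    split_ifs with h
    · constructor
      · intro hf; simp at hf
      · intro hall; exact absurd (hall i (List.mem_cons_self ..)) h
    · rw [ih]
      constructor
      · intro hall a ha
        rcases List.mem_cons.mp ha with rfl | ha'
        · exact not_ne_iff.mp h
        · exact hall a ha'
      · intro hall a ha; exact hall a (List.mem_cons_of_mem _ ha)

-- A = true  ↔  the two digit lists are permutations of one another
theorem pvA_iff_perm (n1 n2 : Int) (h1 : 0 ≤ n1) (h2 : 0 ≤ n2) :
    are_permutations n1 n2 = true ↔ (pvDigits n1).Perm (pvDigits n2) := by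
  have hdig1 := pv_toChars_digits n1 h1
  have hdig2 := pv_toChars_digits n2 h2
  have hr : PySem.List.pyRange 0 10 1 = [0,1,2,3,4,5,6,7,8,9] := by decide
  rw [are_permutations, hr, pv_check_iff]
  constructor
  · intro h
    rw [List.perm_iff_count]
    intro a
    by_cases ha : 0 ≤ a ∧ a < 10
    · have hi : a.toNat < 10 := by omega
      have := h a (by simp; omega)
      rw [pv_fold_count _ _ (by simp) hdig1 a.toNat hi,
          pv_fold_count _ _ (by simp) hdig2 a.toNat hi] at this
      have hcast : ((a.toNat : Nat) : Int) = a := by omega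
      simp only [hcast] at this
      have : ((pvDigits n1).count a : Int) = ((pvDigits n2).count a : Int) := by
        simpa [pvDigits] using this
      exact_mod_cast this
    · have c1 : (pvDigits n1).count a = 0 := by
        rw [List.count_eq_zero]
        intro hmem; exact ha (pvDigits_mem n1 h1 a hmem)
      have c2 : (pvDigits n2).count a = 0 := by
        rw [List.count_eq_zero]
        intro hmem; exact ha (pvDigits_mem n2 h2 a hmem)
      rw [c1, c2]
  · intro hperm i hi
    have hi10 : i.toNat < 10 := by
      simp at hi; omega
    rw [pv_fold_count _ _ (by simp) hdig1 i.toNat hi10,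
        pv_fold_count _ _ (by simp) hdig2 i.toNat hi10]
    have := (List.perm_iff_count.mp hperm) ((i.toNat : Nat) : Int)
    simp only [pvDigits] at this
    omega

-- ===== VERDICT (by name: the statement is the Claim_ definition above) =====
theorem are_permutations_spec : Claim_equal_are_permutations := by
  intro n1 n2 _ hpre
  unfold Spec_are_permutations
  obtain ⟨h1, h2⟩ := hpre
  have hB : are_permutations_alt n1 n2 = true ↔ (pvDigits n1).Perm (pvDigits n2) := by
    rw [are_permutations_alt, beq_iff_eq,
        PySem.List.sorted_id_eq_sorted_id_iff_perm]
  have hA := pvA_iff_perm n1 n2 h1 h2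
  by_cases h : (pvDigits n1).Perm (pvDigits n2)
  · rw [hA.mpr h, (hB.mpr h)]
  · have ha : are_permutations n1 n2 = false := by
      rcases Bool.eq_false_or_eq_true (are_permutations n1 n2) with ht | hf
      · exact absurd (hA.mp ht) h
      · exact hf
    have hb : are_permutations_alt n1 n2 = false := by
      rcases Bool.eq_false_or_eq_true (are_permutations_alt n1 n2) with ht | hf
      · exact absurd (hB.mp ht) h
      · exact hf
    rw [ha, hb]
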